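-- pv_equiv track=rewrite | github.com/hoomexsun/xlit | src/mt_/__init__.py | use_split_points
-- ===== SOURCE A (Python) =====
-- from typing import List
--
-- def use_split_points(
--     char_list: List[str], split_points: List[bool], sep: str = ""
-- ) -> List[str]:
--     syllabified_word = []
--     used_idx = 0
--     for idx, marker in enumerate(split_points):
--         if marker:
--             syllable = sep.join(char_list[used_idx : idx + 1])
--             syllabified_word.append(syllable)
--             used_idx = idx + 1
--     syllable = sep.join(char_list[used_idx:])
--     syllabified_word.append(syllable)
--
--     return syllabified_word
-- ===== SOURCE B (Python) =====
-- from typing import List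
--
-- def use_split_points(
--     char_list: List[str], split_points: List[bool], sep: str = ""
-- ) -> List[str]:
--     # Build the table of cut positions first, then slice between consecutive boundaries.
--     cuts = [i + 1 for i, m in enumerate(split_points) if m]
--     bounds = [0] + cuts
--     out = [sep.join(char_list[a:b]) for a, b in zip(bounds, bounds[1:])]
--     out.append(sep.join(char_list[(cuts[-1] if cuts else 0):]))
--     return out
-- ===== Notes on version B (the rewrite author's own statement) =====
-- stated objective: alternative
-- what changed: A interleaves cut detection and segment emission in one stateful loop (used_idx accumulator); B first builds the table of cut positions, then emits segments by slicing between consecutive boundaries paired with zip.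
import Mathlib
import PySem

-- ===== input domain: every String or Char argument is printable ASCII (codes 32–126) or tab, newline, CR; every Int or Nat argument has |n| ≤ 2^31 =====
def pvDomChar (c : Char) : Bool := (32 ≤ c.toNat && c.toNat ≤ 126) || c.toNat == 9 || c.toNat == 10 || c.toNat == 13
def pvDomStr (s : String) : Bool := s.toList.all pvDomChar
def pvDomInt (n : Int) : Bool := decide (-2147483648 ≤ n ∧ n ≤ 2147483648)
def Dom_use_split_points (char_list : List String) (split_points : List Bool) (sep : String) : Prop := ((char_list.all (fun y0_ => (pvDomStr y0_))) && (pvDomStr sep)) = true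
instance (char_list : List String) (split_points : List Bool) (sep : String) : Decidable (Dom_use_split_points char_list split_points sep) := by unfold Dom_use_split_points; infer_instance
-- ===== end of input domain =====

-- B replaces A's single stateful loop (used_idx accumulator) by a cut-position table
-- followed by slicing between consecutive boundaries (alternative decomposition, same cost).


-- ===== PORT A =====
-- A: one loop over enumerate(split_points) carrying (accumulated syllables, used_idx);
-- on a marker it appends sep.join(char_list[used_idx:idx+1]) and advances used_idx.
def use_split_points (char_list : List String) (split_points : List Bool) (sep : String) : List String :=
  let st := (PySem.List.enumerate split_points).foldl
    (fun (s : List String × Int) (p : Int × Bool) =>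
      if p.2 then
        (s.1 ++ [PySem.Str.join sep (PySem.List.slice char_list (some s.2) (some (p.1 + 1)))], p.1 + 1)
      else s) ([], 0)
  st.1 ++ [PySem.Str.join sep (PySem.List.slice char_list (some st.2) none)]

-- ===== PORT B =====
-- B: cuts = [i+1 for i, m in enumerate(split_points) if m]; bounds = [0] + cuts;
-- segments from zip(bounds, bounds[1:]); trailing segment from cuts[-1] if cuts else 0.
def use_split_points_alt (char_list : List String) (split_points : List Bool) (sep : String) : List String :=
  let cuts := (PySem.List.enumerate split_points).filterMap
    (fun p => if p.2 then some (p.1 + 1) else none)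
  let bounds := 0 :: cuts
  let out := (bounds.zip (PySem.List.slice bounds (some 1) none)).map
    (fun q => PySem.Str.join sep (PySem.List.slice char_list (some q.1) (some q.2)))
  out ++ [PySem.Str.join sep (PySem.List.slice char_list
    (some (match cuts.getLast? with | some c => c | none => 0)) none)]

-- ===== PRECONDITION & SPEC =====
def Spec_use_split_points (char_list : List String) (split_points : List Bool) (sep : String) (out : List String) : Prop := out = use_split_points_alt char_list split_points sep
instance (char_list : List String) (split_points : List Bool) (sep : String) (out : List String) : Decidable (Spec_use_split_points char_list split_points sep out) := by unfold Spec_use_split_points; infer_instance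

-- ===== CLAIM (what is proved, stated in full; the proofs are below) =====
def Claim_equal_use_split_points : Prop := ∀ (char_list : List String) (split_points : List Bool) (sep : String), Dom_use_split_points char_list split_points sep → Spec_use_split_points char_list split_points sep (use_split_points char_list split_points sep)

-- ===== LEMMAS AND PROOFS =====

-- A's loop state after consuming `sp` starting at index `i` with pending boundary `u`:
-- the emitted segments are the consecutive-boundary segments of B's cut table, and the
-- final used_idx is the last cut (or `u` if none).
theorem use_split_points_loop_eq (char_list : List String) (sep : String) :
    ∀ (sp : List Bool) (i u : Int) (acc : List String),
    (PySem.List.enumerate sp i).foldl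
      (fun (s : List String × Int) (p : Int × Bool) =>
        if p.2 then
          (s.1 ++ [PySem.Str.join sep (PySem.List.slice char_list (some s.2) (some (p.1 + 1)))], p.1 + 1)
        else s) (acc, u)
    = (acc ++ (((u :: ((PySem.List.enumerate sp i).filterMap
          (fun p => if p.2 then some (p.1 + 1) else none))).zip
          ((PySem.List.enumerate sp i).filterMap
          (fun p => if p.2 then some (p.1 + 1) else none))).map
          (fun q => PySem.Str.join sep (PySem.List.slice char_list (some q.1) (some q.2)))),
        ((PySem.List.enumerate sp i).filterMap
          (fun p => if p.2 then some (p.1 + 1) else none)).getLastD u) := by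
  intro sp
  induction sp with
  | nil => intro i u acc; simp [PySem.List.enumerate_nil]
  | cons m rest ih =>
    intro i u acc
    rw [PySem.List.enumerate_cons]
    cases m with
    | false => simpa using ih (i + 1) u acc
    | true =>
      simp only [List.foldl_cons, List.filterMap_cons, if_true]
      rw [ih (i + 1) (i + 1) (acc ++ [PySem.Str.join sep (PySem.List.slice char_list (some u) (some (i + 1)))])]
      simp only [List.zip_cons_cons, List.map_cons, List.getLastD_cons, List.append_assoc,
        List.cons_append, List.nil_append]

theorem getLastD_eq_match (l : List Int) :
    (match l.getLast? with | some c => c | none => 0) = l.getLastD 0 := by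
  cases h : l.getLast? with
  | none => simp [List.getLastD_eq_getLast?, h]
  | some c => simp [List.getLastD_eq_getLast?, h]

-- ===== VERDICT (by name: the statement is the Claim_ definition above) =====
theorem use_split_points_spec : Claim_equal_use_split_points := by
  intro char_list split_points sep _
  show use_split_points char_list split_points sep = use_split_points_alt char_list split_points sep
  simp only [use_split_points, use_split_points_alt, PySem.List.slice_from_one]
  rw [use_split_points_loop_eq char_list sep split_points 0 0 []]
  rw [getLastD_eq_match]
  simp only [List.tail_cons, List.nil_append]
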